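-- pv_equiv track=rewrite | github.com/tomshafer/shell-utilities | git.py | collect_response
-- ===== SOURCE A (Python) =====
-- def collect_response(response_lines):
--     """
--     Collect a Git response into a dictionary by response type.
--
--     Arguments
--     ---------
--     response_lines: iterable
--         a list of lines of text returned by Git
--
--     Returns
--     -------
--     dict
--         a dictionary with keys corresponding to `git status` output types
--         (e.g., '#', '1', or '?') and lists of lines as values
--     """
--     response_dict = {}
--     for entry in filter(None, response_lines):
--         prefix = entry[0]
--         if prefix in response_dict:
--             response_dict[prefix] += [entry]
--         else:
--             response_dict[prefix] = [entry]
--     return response_dict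
-- ===== SOURCE B (Python) =====
-- def collect_response(response_lines):
--     kept = [e for e in response_lines if e]
--     prefixes = dict.fromkeys(e[0] for e in kept)
--     return {k: [e for e in kept if e[0] == k] for k in prefixes}
-- ===== Notes on version B (the rewrite author's own statement) =====
-- stated objective: alternative
-- what changed: A builds the dict in a single pass, appending each line to its key's list as it goes; B first deduplicates the first characters of the kept lines (dict.fromkeys) and then builds the dict with one filter pass per distinct key, relying on first-occurrence order matching A's insertion order.
import Mathlib
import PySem

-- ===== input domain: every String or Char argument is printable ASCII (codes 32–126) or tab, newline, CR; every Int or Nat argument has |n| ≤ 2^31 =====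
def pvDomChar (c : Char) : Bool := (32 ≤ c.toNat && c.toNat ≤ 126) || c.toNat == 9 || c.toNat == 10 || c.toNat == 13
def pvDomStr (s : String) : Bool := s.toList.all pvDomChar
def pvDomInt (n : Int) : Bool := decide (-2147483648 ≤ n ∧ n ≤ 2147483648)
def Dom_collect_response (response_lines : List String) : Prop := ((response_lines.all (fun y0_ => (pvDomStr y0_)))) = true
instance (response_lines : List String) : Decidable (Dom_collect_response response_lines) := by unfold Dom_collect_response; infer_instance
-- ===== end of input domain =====

-- B replaces A's single accumulation loop over a dict with a two-phase computation
-- (dedup the first characters, then one filter per distinct key); objective: alternative, not faster.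

-- entry[0] as a one-character Python string (entries are nonempty after filter(None))
def pvPrefix (e : String) : String := String.ofList (e.toList.take 1)

-- ===== PORT A =====
def collect_response (response_lines : List String) : List (String × List String) :=
  ((response_lines.filter (fun e => e ≠ "")).foldl
    (fun d entry =>
      let p := pvPrefix entry
      if d.contains p then d.insert p (d.getD p [] ++ [entry])
      else d.insert p [entry])
    PySem.Dict.empty).items

-- ===== PORT B =====
def collect_response_alt (response_lines : List String) : List (String × List String) :=
  let kept := response_lines.filter (fun e => e ≠ "")
  let prefixes := PySem.List.dedup (kept.map pvPrefix)
  prefixes.map (fun k => (k, kept.filter (fun e => pvPrefix e == k)))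

-- ===== PRECONDITION & SPEC =====
def Spec_collect_response (response_lines : List String) (out : List (String × List String)) : Prop := out = collect_response_alt response_lines
instance (response_lines : List String) (out : List (String × List String)) : Decidable (Spec_collect_response response_lines out) := by unfold Spec_collect_response; infer_instance

-- ===== CLAIM (what is proved, stated in full; the proofs are below) =====
def Claim_equal_collect_response : Prop := ∀ (response_lines : List String), Dom_collect_response response_lines → Spec_collect_response response_lines (collect_response response_lines)

-- ===== LEMMAS AND PROOFS =====

-- A's loop body is exactly dict.modify (both branches insert p (old ++ [entry]))
theorem pvStep_eq_modify (d : PySem.Dict String (List String)) (entry : String) :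
    (let p := pvPrefix entry
     if d.contains p then d.insert p (d.getD p [] ++ [entry])
     else d.insert p [entry])
    = d.modify (pvPrefix entry) [] (· ++ [entry]) := by
  by_cases h : d.contains (pvPrefix entry)
  · simp [h, PySem.Dict.modify]
  · have hd : d.getD (pvPrefix entry) [] = [] :=
      PySem.Dict.getD_of_not_contains d [] (by simpa using h)
    simp [h, PySem.Dict.modify, hd]

theorem pvFold_getD (l : List String) (c : String) :
    (l.foldl (fun d e => d.modify (pvPrefix e) [] (· ++ [e])) PySem.Dict.empty).getD c []
    = l.filter (fun e => pvPrefix e == c) := by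
  have h := PySem.Dict.getD_foldl_modify_append (l := l.map (fun e => (pvPrefix e, e)))
      (d := (PySem.Dict.empty : PySem.Dict String (List String))) (c := c)
  rw [List.foldl_map] at h
  simpa [List.filter_map, Function.comp_def, List.map_filter] using h

theorem pvFold_keys (l : List String) :
    (l.foldl (fun d e => d.modify (pvPrefix e) [] (· ++ [e])) PySem.Dict.empty).keys
    = PySem.List.dedup (l.map pvPrefix) := by
  rw [PySem.Dict.keys_foldl_modify_key]
  simp [PySem.Set.update_nil_left, PySem.Dict.keys_empty]

theorem collect_response_spec : Claim_equal_collect_response := by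
  intro rs _
  unfold Spec_collect_response collect_response collect_response_alt
  simp only [funext (fun d => funext (pvStep_eq_modify d))]
  set kept := rs.filter (fun e => e ≠ "") with hk
  have hnd : (kept.foldl (fun d e => d.modify (pvPrefix e) [] (· ++ [e])) PySem.Dict.empty).keys.Nodup := by
    apply PySem.Dict.nodup_keys_foldl_modify_key
    exact PySem.Dict.nodup_keys_empty
  rw [PySem.Dict.items_eq_map_keys _ hnd []]
  rw [pvFold_keys]
  exact List.map_congr_left (fun k _ => by rw [pvFold_getD])
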